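/-
  THE HEADER CLAUSES OF `VorbisOK f` THAT PRECEDE THE CODEBOOKS (INVARIANTS §3.1, §3.2 first row; design/I2 §1.1–1.3), over the
  ONE vocabulary of Vorbis/Blocks.lean (`Blk` the allocated blocks, `Site` the result of a USE lemma, `ObjEq` / `Block.Kept` the
  hypotheses of a frame lemma):

      HeaderOK mem f             HD1 – HD3   (I2's H1 – H3): channels, sample_rate, the two block sizes      (no SHAPE clause: no `Blk`)
      CommentOK Blk mem f n      CM1 – CM3   (I2's C1 – C3): vendor, comment_list, the comments below the loop counter `n`
      CommentsOK Blk mem f       `CommentOK` with `n = comment_list_length`: the group at point SD.2 and after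
      CodebooksOK Blk mem f      F1, F2: 1 ≤ codebook_count ≤ 256, the codebooks block of 2120 · codebook_count bytes
      CB0 Blk mem f              codebooks = NULL, or CodebooksOK                   (= H4, what vorbis_deinit needs)

  USE (each returns `Site Live a n`; from it `.acc hc`, `.acc_addr hc`, `.acc_range hc`, `.has hc hL`, `.inside hc`, `.inLive`):
      CM2.site_slot hL h i hi ha               the slot `comment_list[i]`, `i < comment_list_length`
      site_string hL hB j hj ha                character `j ≤ len` of a string block `Blk ⟨p, len + 1⟩` (vendor, one comment)
      CodebooksOK.site_cb_field hL h b hb off n hoff hn ha      the `n` bytes at offset `off` of `f->codebooks[b]`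
      CodebooksOK.cb_in h b hb                 `cb(b)` lies inside the codebooks block (with `h.F2`: the hypotheses `hB`, `hin` of
                                               the USE lemmas of Vorbis/Codebook/Book.lean)
      CodebooksOK.cb_inside h hok b hb         `cb(b)` lies in the data space;   cb_disjoint   cb_kept
  FRAME, per group `P` ∈ {HeaderOK, CommentOK, CommentsOK, CodebooksOK, CB0}:
      P.wins                     the windows of `*f` the clauses read
      P.Reads mem f B            the blocks whose content the clauses read (only `CommentOK`: the table of comment pointers)
      P.Owns mem f B             the blocks the SHAPE clauses mention
      P.transfer h he hk hB      the two-address frame lemma: `ObjEq P.wins mem p mem' f`, the read blocks `Kept`, the owned blocks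
                                 still allocated ⇒ `P Blk' mem' f`
      P.frame h hs hk            the instance `p = f` from `ObjSame f mem mem'`;   P.reblk h hB   the instance `mem' = mem`
      P.owns_blk / P.reads_blk   an owned / read block is allocated
  `f` is the address of the decoder object (`&p` of stb_vorbis_open_memory during start_decoder, the arena copy afterwards).
-/
import Vorbis.Codebook.Basic
namespace Vorbis
open X86 X86.User Asan

/-! ### HD1 – HD3: the identification header -/

/-- **HD3** (I2 H3): `blocksize_0 = 2^a`, `blocksize_1 = 2^b`, `6 ≤ a ≤ b ≤ 13`. Established at lines 3657–3661 (the two stores come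
before the three tests). Relied on by init_blocksize, the MDCT / window sizes, `n` of decode_residue, W2. -/
def HD3 (mem : Mem) (f : Nat) : Prop :=
  ∃ a b : Nat, 6 ≤ a ∧ a ≤ b ∧ b ≤ 13 ∧
    stb_vorbis.blocksize_0 mem f = ((2 ^ a : Nat) : Int) ∧ stb_vorbis.blocksize_1 mem f = ((2 ^ b : Nat) : Int)

/-- **`HeaderOK f`** = HD1 ∧ HD2 ∧ HD3 (I2's H1 – H3), point SD.1 of INVARIANTS §5. -/
structure HeaderOK (mem : Mem) (f : Nat) : Prop where
  /-- HD1: `1 ≤ channels ≤ 16` (lines 3646–3647; `channels` is stored BEFORE the tests). All per-channel loops and the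
  16-entry pointer arrays rely on it. -/
  HD1 : 1 ≤ stb_vorbis.channels mem f ∧ stb_vorbis.channels mem f ≤ 16
  /-- HD2: `sample_rate ≠ 0` (line 3648). Nothing memory-relevant relies on it. -/
  HD2 : stb_vorbis.sample_rate mem f ≠ 0
  /-- HD3: the block sizes are powers of two, `64 ≤ blocksize_0 ≤ blocksize_1 ≤ 8192`. -/
  HD3 : HD3 mem f

/-- A power of two with an exponent in `[lo, hi]` lies between the two powers (pure arithmetic for HD3's consequences). -/
theorem two_pow_range {a lo hi : Nat} (h1 : lo ≤ a) (h2 : a ≤ hi) : 2 ^ lo ≤ 2 ^ a ∧ 2 ^ a ≤ 2 ^ hi :=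
  ⟨Nat.pow_le_pow_right (by decide) h1, Nat.pow_le_pow_right (by decide) h2⟩

/-- **What HD3 gives as inequalities**: `64 ≤ blocksize_0 ≤ blocksize_1 ≤ 8192`. -/
theorem HD3.range {mem : Mem} {f : Nat} (h : HD3 mem f) :
    64 ≤ stb_vorbis.blocksize_0 mem f ∧ stb_vorbis.blocksize_0 mem f ≤ stb_vorbis.blocksize_1 mem f ∧
      stb_vorbis.blocksize_1 mem f ≤ 8192 := by
  obtain ⟨a, b, h6, hab, h13, e0, e1⟩ := h
  have ha := two_pow_range h6 (Nat.le_trans hab h13)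
  have hb := two_pow_range (Nat.le_trans h6 hab) h13
  have hm : 2 ^ a ≤ 2 ^ b := Nat.pow_le_pow_right (by decide) hab
  rw [e0, e1]
  have c64 : (2 : Nat) ^ 6 = 64 := by decide
  have c8192 : (2 : Nat) ^ 13 = 8192 := by decide
  omega

/-- The block sizes are multiples of 8 (so `n / 2`, `n / 4`, `n / 8` are exact: what the MDCT closed forms start from). -/
theorem HD3.dvd8 {mem : Mem} {f : Nat} (h : HD3 mem f) :
    stb_vorbis.blocksize_0 mem f % 8 = 0 ∧ stb_vorbis.blocksize_1 mem f % 8 = 0 := by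
  obtain ⟨a, b, h6, hab, h13, e0, e1⟩ := h
  have k : ∀ n : Nat, 6 ≤ n → (2 ^ n) % 8 = 0 := by
    intro n hn
    have e : n = 3 + (n - 3) := by omega
    rw [e, Nat.pow_add]
    exact Nat.mul_mod_right 8 _
  have ka := k a h6
  have kb := k b (by omega)
  rw [e0, e1]
  omega


/-! #### FRAME of `HeaderOK` -/

/-- **The windows of `*f` that `HeaderOK` reads**: `sample_rate`, `channels` (`[0, 8)`) and `blocksize_0`, `blocksize_1`
(`[152, 160)`). -/
def HeaderOK.wins : Wins := [(0, 8), (152, 160)]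

/-- The numerals of `HeaderOK.wins` are the generated offsets (a layout change fails here). -/
example : HeaderOK.wins =
    [(Off.stb_vorbis.sample_rate, Off.stb_vorbis.setup_memory_required),
     (Off.stb_vorbis.blocksize_0, Off.stb_vorbis.codebook_count)] := by
  simp only [HeaderOK.wins, voff]

/-- **The two-address frame lemma of `HeaderOK`**: the four fields of `(mem', f)` have the values of `(mem, p)`. The group reads no
block content and owns no block. -/
theorem HeaderOK.transfer {mem mem' : Mem} {p f : Nat} (h : HeaderOK mem p) (he : ObjEq HeaderOK.wins mem p mem' f) :
    HeaderOK mem' f := by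
  have ech : stb_vorbis.channels mem' f = stb_vorbis.channels mem p := by
    simp only [vacc, voff]
    exact he.i32 4 (by decide)
  have esr : stb_vorbis.sample_rate mem' f = stb_vorbis.sample_rate mem p := by
    simp only [vacc, voff, Nat.add_zero]
    exact he.u32_0 (by decide)
  have eb0 : stb_vorbis.blocksize_0 mem' f = stb_vorbis.blocksize_0 mem p := by
    simp only [vacc, voff]
    exact he.i32 152 (by decide)
  have eb1 : stb_vorbis.blocksize_1 mem' f = stb_vorbis.blocksize_1 mem p := by
    simp only [vacc, voff]
    exact he.i32 156 (by decide)
  refine ⟨?_, ?_, ?_⟩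
  · rw [ech]
    exact h.HD1
  · rw [esr]
    exact h.HD2
  · obtain ⟨a, b, h6, hab, h13, e0, e1⟩ := h.HD3
    rw [← eb0] at e0
    rw [← eb1] at e1
    exact ⟨a, b, h6, hab, h13, e0, e1⟩

/-- **FRAME of `HeaderOK`**: the instance `p = f` of `transfer`, from what every allocator call leaves of `*f`. -/
theorem HeaderOK.frame {mem mem' : Mem} {f : Nat} (h : HeaderOK mem f) (hs : ObjSame f mem mem') : HeaderOK mem' f :=
  h.transfer (hs.sub (by decide))

/-! ### CM1 – CM3: the comment header -/

/-- **CM1** (I2 C1): `vendor` is NULL (as vorbis_init left it) or an allocated block of EXACTLY `len + 1` bytes with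
`0 ≤ len < INT_MAX` (lines 3678–3681: `setup_malloc(f, len + 1)`, + FIX 1). The length `len` is not stored anywhere: it is a ghost of
the clause. -/
def CM1 (Blk : Block → Prop) (mem : Mem) (f : Nat) : Prop :=
  stb_vorbis.vendor mem f = 0 ∨ ∃ len : Nat, len < 2147483647 ∧ Blk ⟨stb_vorbis.vendor mem f, len + 1⟩

/-- **CM2** (= H1; I2 C2): `comment_list_length ≤ 0`, or `comment_list` is an allocated block of EXACTLY
`8 · comment_list_length` bytes and the length is at most `0FFFFFFFH` (no 32-bit wrap of the size). Holds at EVERY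
return of start_decoder (lines 3687–3693 + FIX 2): vorbis_deinit loads `comment_list[i]` for every `i < comment_list_length` without a guard. -/
def CM2 (Blk : Block → Prop) (mem : Mem) (f : Nat) : Prop :=
  stb_vorbis.comment_list_length mem f ≤ 0 ∨
    (stb_vorbis.comment_list_length mem f ≤ 0x0FFFFFFF ∧
      Blk ⟨stb_vorbis.comment_list mem f, 8 * (stb_vorbis.comment_list_length mem f).toNat⟩)

/-- **CM3** (I2 C3) for the loop counter `n` of `for (i = 0; i < f->comment_list_length; ++i)`: every `comment_list[i]`, `i < n`, is
an allocated block of EXACTLY `len_i + 1` bytes (lines 3695–3703 + FIX 1); the words at and above the counter are NULL (FIX 12 zero-fills the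
block; nobody dereferences them). After the loop `n` is the comment count. -/
def CM3 (Blk : Block → Prop) (mem : Mem) (f n : Nat) : Prop :=
  (∀ i, i < n → ∃ len : Nat, len < 2147483647 ∧ Blk ⟨mem.ptr (stb_vorbis.comment_list_at mem f i), len + 1⟩) ∧
  (∀ i : Nat, n ≤ i → (i : Int) < stb_vorbis.comment_list_length mem f → mem.ptr (stb_vorbis.comment_list_at mem f i) = 0)

/-- **`CommentOK f`** = CM1 ∧ CM2 ∧ CM3 (I2's C1 – C3) with the comment loop's counter `n`; point SD.2 has
`n = comment_list_length` (or 0 when the length is not positive): `CommentsOK`. -/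
structure CommentOK (Blk : Block → Prop) (mem : Mem) (f n : Nat) : Prop where
  /-- CM1: the vendor string. -/
  CM1 : CM1 Blk mem f
  /-- CM2: the table of comment pointers. -/
  CM2 : CM2 Blk mem f
  /-- CM3: the comments already read. -/
  CM3 : CM3 Blk mem f n
  /-- The counter does not pass the count. -/
  le : (n : Int) ≤ stb_vorbis.comment_list_length mem f ∨ n = 0

/-- **`CommentsOK f`**: `CommentOK` after the comment loop (`n = comment_list_length`): the group of the top-level invariant from
point SD.2 on. -/
def CommentsOK (Blk : Block → Prop) (mem : Mem) (f : Nat) : Prop :=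
  CommentOK Blk mem f (stb_vorbis.comment_list_length mem f).toNat

/-- `CommentsOK` unfolded. -/
theorem CommentsOK_def (Blk : Block → Prop) (mem : Mem) (f : Nat) :
    CommentsOK Blk mem f = CommentOK Blk mem f (stb_vorbis.comment_list_length mem f).toNat := id rfl

/-! #### USE -/

/-- **USE of CM2: the slot `comment_list[i]`, `i < comment_list_length`** (the store and the loads of the comment loop;
vorbis_deinit's load): its 8 bytes are a check site. -/
theorem CM2.site_slot {Blk : Block → Prop} {Live : Nat → Prop} {mem : Mem} {f : Nat} (hL : BlkLive Blk Live)
    (h : CM2 Blk mem f) (i : Nat) (hi : (i : Int) < stb_vorbis.comment_list_length mem f) {a : Nat}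
    (ha : a = stb_vorbis.comment_list_at mem f i) : Site Live a 8 := by
  subst ha
  cases h with
  | inl h0 => omega
  | inr h1 =>
    apply Site.of_blk hL h1.2
    · simp only [stb_vorbis.comment_list_at]
      omega
    · simp only [stb_vorbis.comment_list_at]
      omega
    · omega

/-- **USE of CM1 / CM3: character `j ≤ len` of a string block** (`vendor[j]`, `comment_list[i][j]`: the stores of the two string
loops and the final `'\0'`), from the block fact of the non-NULL case. -/
theorem site_string {Blk : Block → Prop} {Live : Nat → Prop} {p len : Nat} (hL : BlkLive Blk Live) (hB : Blk ⟨p, len + 1⟩)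
    (j : Nat) (hj : j ≤ len) {a : Nat} (ha : a = p + j) : Site Live a 1 := by
  subst ha
  apply Site.of_blk hL hB
  · simp only []
    omega
  · simp only []
    omega
  · omega

/-! #### FRAME of `CommentOK` -/

/-- **The window of `*f` that `CommentOK` reads**: `vendor`, `comment_list_length`, `comment_list` (`[24, 48)`). -/
def CommentOK.wins : Wins := [(24, 48)]

/-- The numerals of `CommentOK.wins` are the generated offsets. -/
example : CommentOK.wins = [(Off.stb_vorbis.vendor, Off.stb_vorbis.stream)] := by
  simp only [CommentOK.wins, voff]

/-- **The block whose CONTENT `CommentOK` reads**: the table of comment pointers, when there are comments. -/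
inductive CommentOK.Reads (mem : Mem) (f : Nat) : Block → Prop
  /-- `Block(comment_list, 8·comment_list_length)` (CM2), read by CM3 -/
  | table (hpos : 0 < stb_vorbis.comment_list_length mem f) :
      CommentOK.Reads mem f ⟨stb_vorbis.comment_list mem f, 8 * (stb_vorbis.comment_list_length mem f).toNat⟩

/-- **The blocks the SHAPE clauses of `CommentOK … n` mention.** The lengths of the strings are ghosts of the clauses (they are
stored nowhere), so the two string constructors range over EVERY size `sz`: a block based at `vendor`, a block based at
`comment_list[i]`, `i < n`. -/
inductive CommentOK.Owns (mem : Mem) (f n : Nat) : Block → Prop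
  /-- `Block(vendor, len + 1)` (CM1) -/
  | vendor (hne : stb_vorbis.vendor mem f ≠ 0) (sz : Nat) : CommentOK.Owns mem f n ⟨stb_vorbis.vendor mem f, sz⟩
  /-- `Block(comment_list, 8·comment_list_length)` (CM2) -/
  | table (hpos : 0 < stb_vorbis.comment_list_length mem f) :
      CommentOK.Owns mem f n ⟨stb_vorbis.comment_list mem f, 8 * (stb_vorbis.comment_list_length mem f).toNat⟩
  /-- `Block(comment_list[i], len_i + 1)`, `i < n` (CM3) -/
  | comment (i : Nat) (hi : i < n) (sz : Nat) :
      CommentOK.Owns mem f n ⟨mem.ptr (stb_vorbis.comment_list_at mem f i), sz⟩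

/-- A smaller counter owns less. -/
theorem CommentOK.Owns.mono {mem : Mem} {f n m : Nat} {B : Block} (h : CommentOK.Owns mem f m B) (hm : m ≤ n) :
    CommentOK.Owns mem f n B := by
  cases h with
  | vendor hne sz => exact CommentOK.Owns.vendor hne sz
  | table hpos => exact CommentOK.Owns.table hpos
  | comment i hi sz => exact CommentOK.Owns.comment i (by omega) sz

/-- **The block `CommentOK` reads is allocated** (CM2). -/
theorem CommentOK.reads_blk {Blk : Block → Prop} {mem : Mem} {f n : Nat} {B : Block} (h : CommentOK Blk mem f n)
    (hR : CommentOK.Reads mem f B) : Blk B := by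
  cases hR with
  | table hpos =>
    cases h.CM2 with
    | inl h0 => omega
    | inr h1 => exact h1.2

/-- **At the base of every owned block there is an allocated block.** (Not `Blk B` itself: the sizes of the string blocks are
ghosts, `Owns` ranges over all of them. The table, the one block whose size is in memory, is `reads_blk`.) -/
theorem CommentOK.owns_blk {Blk : Block → Prop} {mem : Mem} {f n : Nat} {B : Block} (h : CommentOK Blk mem f n)
    (hO : CommentOK.Owns mem f n B) : ∃ sz, Blk ⟨B.base, sz⟩ := by
  cases hO with
  | vendor hne sz =>
    cases h.CM1 with
    | inl h0 => exact absurd h0 hne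
    | inr h1 =>
      obtain ⟨len, _, hb⟩ := h1
      exact ⟨len + 1, hb⟩
  | table hpos => exact ⟨_, h.reads_blk (CommentOK.Reads.table hpos)⟩
  | comment i hi sz =>
    obtain ⟨len, _, hb⟩ := h.CM3.1 i hi
    exact ⟨len + 1, hb⟩

/-- **The block predicate changes, the memory does not** (a block was allocated, a temp block was freed, a frame was popped):
`CommentOK` holds again if the blocks it owns are still allocated. (The instance `mem' = mem` of `transfer`, proved directly
so that it needs no no-wrap hypothesis.) -/
theorem CommentOK.reblk {Blk Blk' : Block → Prop} {mem : Mem} {f n : Nat} (h : CommentOK Blk mem f n)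
    (hB : ∀ B, CommentOK.Owns mem f n B → Blk B → Blk' B) : CommentOK Blk' mem f n := by
  refine ⟨?_, ?_, ?_, h.le⟩
  · cases h.CM1 with
    | inl h0 => exact Or.inl h0
    | inr h1 =>
      obtain ⟨len, hlen, hb⟩ := h1
      by_cases hne : stb_vorbis.vendor mem f = 0
      · exact Or.inl hne
      · exact Or.inr ⟨len, hlen, hB _ (CommentOK.Owns.vendor hne (len + 1)) hb⟩
  · cases h.CM2 with
    | inl h0 => exact Or.inl h0
    | inr h1 =>
      by_cases hpos : 0 < stb_vorbis.comment_list_length mem f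
      · exact Or.inr ⟨h1.1, hB _ (CommentOK.Owns.table hpos) h1.2⟩
      · exact Or.inl (by omega)
  · constructor
    · intro i hi
      obtain ⟨len, hlen, hb⟩ := h.CM3.1 i hi
      exact ⟨len, hlen, hB _ (CommentOK.Owns.comment i hi (len + 1)) hb⟩
    · exact h.CM3.2

/-- **The two-address frame lemma of `CommentOK`**: the three fields of `(mem', f)` have the values of `(mem, p)`, the table of
comment pointers (when there are comments) is kept, the owned blocks are still allocated. -/
theorem CommentOK.transfer {Blk Blk' : Block → Prop} {mem mem' : Mem} {p f n : Nat} (h : CommentOK Blk mem p n)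
    (he : ObjEq CommentOK.wins mem p mem' f)
    (hk : ∀ B, CommentOK.Reads mem p B → B.Kept mem mem')
    (hB : ∀ B, CommentOK.Owns mem p n B → Blk B → Blk' B) : CommentOK Blk' mem' f n := by
  have h' := h.reblk hB
  have ev : stb_vorbis.vendor mem' f = stb_vorbis.vendor mem p := by
    simp only [vacc, voff]
    exact he.u64 24 (by decide)
  have en : stb_vorbis.comment_list_length mem' f = stb_vorbis.comment_list_length mem p := by
    simp only [vacc, voff]
    exact he.i32 32 (by decide)
  have el : stb_vorbis.comment_list mem' f = stb_vorbis.comment_list mem p := by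
    simp only [vacc, voff]
    exact he.u64 40 (by decide)
  have eat : ∀ i, stb_vorbis.comment_list_at mem' f i = stb_vorbis.comment_list_at mem p i := by
    intro i
    simp only [stb_vorbis.comment_list_at, el]
  -- a slot of the table reads the same
  have eslot : ∀ i : Nat, (i : Int) < stb_vorbis.comment_list_length mem p →
      mem'.ptr (stb_vorbis.comment_list_at mem p i) = mem.ptr (stb_vorbis.comment_list_at mem p i) := by
    intro i hi
    have hpos : 0 < stb_vorbis.comment_list_length mem p := by omega
    have hkept := hk _ (CommentOK.Reads.table hpos)
    simp only [stb_vorbis.comment_list_at]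
    apply hkept.ptr
    · simp only []
      omega
    · simp only []
      omega
  refine ⟨?_, ?_, ?_, ?_⟩
  · unfold Vorbis.CM1
    rw [ev]
    exact h'.CM1
  · unfold Vorbis.CM2
    rw [en, el]
    exact h'.CM2
  · unfold Vorbis.CM3
    constructor
    · intro i hi
      have hlt : (i : Int) < stb_vorbis.comment_list_length mem p := by
        cases h.le with
        | inl hle => omega
        | inr h0 => omega
      rw [eat i, eslot i hlt]
      exact h'.CM3.1 i hi
    · intro i hi hlt
      rw [en] at hlt
      rw [eat i, eslot i hlt]
      exact h'.CM3.2 i hi hlt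
  · rw [en]
    exact h'.le

/-- **FRAME of `CommentOK`**: the instance `p = f` of `transfer`. -/
theorem CommentOK.frame {Blk : Block → Prop} {mem mem' : Mem} {f n : Nat} (h : CommentOK Blk mem f n)
    (hs : ObjSame f mem mem') (hk : ∀ B, CommentOK.Reads mem f B → B.Kept mem mem') : CommentOK Blk mem' f n :=
  h.transfer (hs.sub (by decide)) hk (fun _ _ hb => hb)

/-! #### The group `CommentsOK` (the counter is the count) -/

/-- The window of `*f` that `CommentsOK` reads: that of `CommentOK`. -/
def CommentsOK.wins : Wins := [(24, 48)]

/-- The numerals of `CommentsOK.wins` are the generated offsets. -/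
example : CommentsOK.wins = [(Off.stb_vorbis.vendor, Off.stb_vorbis.stream)] := by
  simp only [CommentsOK.wins, voff]

/-- The block whose content `CommentsOK` reads: the table of comment pointers. -/
abbrev CommentsOK.Reads (mem : Mem) (f : Nat) : Block → Prop := CommentOK.Reads mem f

/-- The blocks `CommentsOK` owns: those of `CommentOK` with `n = comment_list_length`. -/
abbrev CommentsOK.Owns (mem : Mem) (f : Nat) : Block → Prop :=
  CommentOK.Owns mem f (stb_vorbis.comment_list_length mem f).toNat

/-- **The two-address frame lemma of `CommentsOK`.** -/
theorem CommentsOK.transfer {Blk Blk' : Block → Prop} {mem mem' : Mem} {p f : Nat} (h : CommentsOK Blk mem p)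
    (he : ObjEq CommentsOK.wins mem p mem' f)
    (hk : ∀ B, CommentsOK.Reads mem p B → B.Kept mem mem')
    (hB : ∀ B, CommentsOK.Owns mem p B → Blk B → Blk' B) : CommentsOK Blk' mem' f := by
  have en : stb_vorbis.comment_list_length mem' f = stb_vorbis.comment_list_length mem p := by
    simp only [vacc, voff]
    exact he.i32 32 (by decide)
  unfold CommentsOK at h ⊢
  rw [en]
  exact CommentOK.transfer h he hk hB

/-- **FRAME of `CommentsOK`**: the instance `p = f` of `transfer`. -/
theorem CommentsOK.frame {Blk : Block → Prop} {mem mem' : Mem} {f : Nat} (h : CommentsOK Blk mem f)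
    (hs : ObjSame f mem mem') (hk : ∀ B, CommentsOK.Reads mem f B → B.Kept mem mem') : CommentsOK Blk mem' f :=
  h.transfer (hs.sub (by decide)) hk (fun _ _ hb => hb)

/-- The block predicate changes, the memory does not. -/
theorem CommentsOK.reblk {Blk Blk' : Block → Prop} {mem : Mem} {f : Nat} (h : CommentsOK Blk mem f)
    (hB : ∀ B, CommentsOK.Owns mem f B → Blk B → Blk' B) : CommentsOK Blk' mem f :=
  CommentOK.reblk h hB

/-- The block `CommentsOK` reads is allocated. -/
theorem CommentsOK.reads_blk {Blk : Block → Prop} {mem : Mem} {f : Nat} {B : Block} (h : CommentsOK Blk mem f)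
    (hR : CommentsOK.Reads mem f B) : Blk B :=
  CommentOK.reads_blk h hR

/-- At the base of every owned block there is an allocated block (see `CommentOK.owns_blk`). -/
theorem CommentsOK.owns_blk {Blk : Block → Prop} {mem : Mem} {f : Nat} {B : Block} (h : CommentsOK Blk mem f)
    (hO : CommentsOK.Owns mem f B) : ∃ sz, Blk ⟨B.base, sz⟩ :=
  CommentOK.owns_blk h hO

/-- The clauses of `CommentsOK`, by their names. -/
theorem CommentsOK.CM2 {Blk : Block → Prop} {mem : Mem} {f : Nat} (h : CommentsOK Blk mem f) : CM2 Blk mem f :=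
  CommentOK.CM2 h

/-! ### F1, F2, CB0: the codebooks block -/

/-- **The codebooks block**: `2120 · codebook_count` bytes at `f->codebooks`. -/
abbrev codebooksBlock (mem : Mem) (f : Nat) : Block :=
  ⟨stb_vorbis.codebooks mem f, Off.sizeof.Codebook * (stb_vorbis.codebook_count mem f).toNat⟩

/-- **F1 ∧ F2** (I2 §1.3; the second disjunct of CB0): `1 ≤ codebook_count ≤ 256` and `codebooks` is an allocated block of EXACTLY
`2120 · codebook_count` bytes (lines 3742–3745). The zero fill by the memset that follows is the transient `ZF` of
Vorbis/Codebook/Build.lean. -/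
structure CodebooksOK (Blk : Block → Prop) (mem : Mem) (f : Nat) : Prop where
  /-- F1: `codebook_count = get_bits(f, 8) + 1`. -/
  F1 : 1 ≤ stb_vorbis.codebook_count mem f ∧ stb_vorbis.codebook_count mem f ≤ 256
  /-- F2: the block of the `Codebook` array (`codebooksBlock mem f`). -/
  F2 : Blk ⟨stb_vorbis.codebooks mem f, Off.sizeof.Codebook * (stb_vorbis.codebook_count mem f).toNat⟩

/-- **CB0** (= H4): `codebooks = NULL`, or F1 ∧ F2. Holds from vorbis_init on, at every return of start_decoder; vorbis_deinit
loads the five pointer fields of every element under `if (p->codebooks)`. -/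
def CB0 (Blk : Block → Prop) (mem : Mem) (f : Nat) : Prop :=
  stb_vorbis.codebooks mem f = 0 ∨ CodebooksOK Blk mem f

/-- With a non-NULL `codebooks` pointer CB0 is its second disjunct. -/
theorem CB0.ok {Blk : Block → Prop} {mem : Mem} {f : Nat} (h : CB0 Blk mem f) (hne : stb_vorbis.codebooks mem f ≠ 0) :
    CodebooksOK Blk mem f := by
  cases h with
  | inl h0 => exact absurd h0 hne
  | inr h1 => exact h1

namespace CodebooksOK

/-- **USE: `f->codebooks[b]`, `b < codebook_count`, lies inside the codebooks block**: the struct `cb(b) = codebooks + 2120 · b`.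
With `h.F2 : Blk (codebooksBlock mem f)` these are the hypotheses `hB`, `hin` ("the struct at `c` lies inside an allocated block")
of `Codebook.site_field`, `Codebook.site_fast_huffman`, `CodebookOK.frame_writeLE`. -/
theorem cb_in {Blk : Block → Prop} {mem : Mem} {f : Nat} (_h : CodebooksOK Blk mem f) (b : Nat)
    (hb : (b : Int) < stb_vorbis.codebook_count mem f) :
    (codebooksBlock mem f).contains (stb_vorbis.codebooks_at mem f b) Off.sizeof.Codebook := by
  have hlt : b < (stb_vorbis.codebook_count mem f).toNat := by omega
  have hel := elem_inside (size := Off.sizeof.Codebook) hlt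
  simp only [vblock, stb_vorbis.codebooks_at]
  omega

/-- **USE: the `n` bytes at offset `off` of `f->codebooks[b]`** (`off + n ≤ 2120`), for any spelling `a` of the address
(`a = codebooks + 2120 * b + off`). -/
theorem site_cb_field {Blk : Block → Prop} {Live : Nat → Prop} {mem : Mem} {f : Nat} (hL : BlkLive Blk Live)
    (h : CodebooksOK Blk mem f) (b : Nat) (hb : (b : Int) < stb_vorbis.codebook_count mem f) (off n : Nat)
    (hoff : off + n ≤ Off.sizeof.Codebook) (hn : 1 ≤ n) {a : Nat} (ha : a = stb_vorbis.codebooks_at mem f b + off) :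
    Site Live a n := by
  subst ha
  have hin := h.cb_in b hb
  simp only [vblock] at hin
  apply Site.of_blk hL h.F2
  · simp only []
    omega
  · simp only []
    omega
  · exact hn

/-- The codebooks block lies in the data space; in particular `cb(b) + 2120` does not wrap. -/
theorem cb_inside {Blk : Block → Prop} {mem : Mem} {f : Nat} (h : CodebooksOK Blk mem f) (hok : BlkOK Blk) (b : Nat)
    (hb : (b : Int) < stb_vorbis.codebook_count mem f) :
    0x100000 ≤ stb_vorbis.codebooks_at mem f b ∧ stb_vorbis.codebooks_at mem f b + Off.sizeof.Codebook ≤ 0xC00000 := by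
  have hin := h.cb_in b hb
  have hblk := hok.inside _ h.F2
  simp only [vblock] at hin
  simp only [] at hblk
  omega

/-- Two different elements of the array do not overlap (a store into one book keeps the others). -/
theorem cb_disjoint (mem : Mem) (f b b' : Nat) (hne : b ≠ b') :
    (Block.mk (stb_vorbis.codebooks_at mem f b) Off.sizeof.Codebook).disjoint
      (Block.mk (stb_vorbis.codebooks_at mem f b') Off.sizeof.Codebook) := by
  simp only [vblock, stb_vorbis.codebooks_at, voff]
  omega

/-- The codebooks block is kept ⇒ every struct `cb(b)` is kept (the hypothesis `hs` of `CodebookOK.transfer`). -/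
theorem cb_kept {Blk : Block → Prop} {mem mem' : Mem} {f : Nat} (h : CodebooksOK Blk mem f)
    (hk : (codebooksBlock mem f).Kept mem mem') (b : Nat) (hb : (b : Int) < stb_vorbis.codebook_count mem f) :
    (Block.mk (stb_vorbis.codebooks_at mem f b) Off.sizeof.Codebook).Kept mem mem' := by
  have hin := h.cb_in b hb
  simp only [vblock] at hin
  exact hk.mono hin.1 hin.2

end CodebooksOK

/-! #### FRAME of `CodebooksOK` and CB0 -/

/-- **The window of `*f` that CB0 / `CodebooksOK` read**: `codebook_count`, `codebooks` (`[160, 176)`). -/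
def CB0.wins : Wins := [(160, 176)]

/-- The same window, under the name of the other group. -/
def CodebooksOK.wins : Wins := [(160, 176)]

/-- The numerals of `CB0.wins` / `CodebooksOK.wins` are the generated offsets. -/
example : CB0.wins = [(Off.stb_vorbis.codebook_count, Off.stb_vorbis.floor_count)] ∧
    CodebooksOK.wins = [(Off.stb_vorbis.codebook_count, Off.stb_vorbis.floor_count)] := by
  simp only [CB0.wins, CodebooksOK.wins, voff, and_self]

/-- **The block `CodebooksOK` owns**: the codebooks block (F2). It reads no block content. -/
inductive CodebooksOK.Owns (mem : Mem) (f : Nat) : Block → Prop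
  /-- `Block(codebooks, 2120·codebook_count)` (F2) -/
  | block : CodebooksOK.Owns mem f ⟨stb_vorbis.codebooks mem f, Off.sizeof.Codebook * (stb_vorbis.codebook_count mem f).toNat⟩

/-- The block CB0 owns: the codebooks block (when `codebooks ≠ NULL`). -/
abbrev CB0.Owns (mem : Mem) (f : Nat) : Block → Prop := CodebooksOK.Owns mem f

/-- The owned block is allocated. -/
theorem CodebooksOK.owns_blk {Blk : Block → Prop} {mem : Mem} {f : Nat} {B : Block} (h : CodebooksOK Blk mem f)
    (hO : CodebooksOK.Owns mem f B) : Blk B := by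
  cases hO with
  | block => exact h.F2

/-- The owned block is allocated, when `codebooks` is not NULL. -/
theorem CB0.owns_blk {Blk : Block → Prop} {mem : Mem} {f : Nat} {B : Block} (h : CB0 Blk mem f)
    (hne : stb_vorbis.codebooks mem f ≠ 0) (hO : CB0.Owns mem f B) : Blk B :=
  (h.ok hne).owns_blk hO

/-- **The two-address frame lemma of `CodebooksOK`**: the two fields of `(mem', f)` have the values of `(mem, p)` and the
codebooks block is still allocated. -/
theorem CodebooksOK.transfer {Blk Blk' : Block → Prop} {mem mem' : Mem} {p f : Nat} (h : CodebooksOK Blk mem p)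
    (he : ObjEq CodebooksOK.wins mem p mem' f)
    (hB : ∀ B, CodebooksOK.Owns mem p B → Blk B → Blk' B) : CodebooksOK Blk' mem' f := by
  have en : stb_vorbis.codebook_count mem' f = stb_vorbis.codebook_count mem p := by
    simp only [vacc, voff]
    exact he.i32 160 (by decide)
  have ep : stb_vorbis.codebooks mem' f = stb_vorbis.codebooks mem p := by
    simp only [vacc, voff]
    exact he.u64 168 (by decide)
  refine ⟨?_, ?_⟩
  · rw [en]
    exact h.F1
  · rw [en, ep]
    exact hB _ CodebooksOK.Owns.block h.F2

/-- **FRAME of `CodebooksOK`**: the instance `p = f` of `transfer`. -/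
theorem CodebooksOK.frame {Blk : Block → Prop} {mem mem' : Mem} {f : Nat} (h : CodebooksOK Blk mem f)
    (hs : ObjSame f mem mem') : CodebooksOK Blk mem' f :=
  h.transfer (hs.sub (by decide)) (fun _ _ hb => hb)

/-- The block predicate changes, the memory does not: the instance `mem' = mem` of `transfer`. -/
theorem CodebooksOK.reblk {Blk Blk' : Block → Prop} {mem : Mem} {f : Nat} (h : CodebooksOK Blk mem f)
    (hB : ∀ B, CodebooksOK.Owns mem f B → Blk B → Blk' B) : CodebooksOK Blk' mem f :=
  h.transfer (ObjEq.refl _ mem f) hB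

/-- **The two-address frame lemma of CB0.** -/
theorem CB0.transfer {Blk Blk' : Block → Prop} {mem mem' : Mem} {p f : Nat} (h : CB0 Blk mem p)
    (he : ObjEq CB0.wins mem p mem' f)
    (hB : ∀ B, CB0.Owns mem p B → Blk B → Blk' B) : CB0 Blk' mem' f := by
  cases h with
  | inl h0 =>
    left
    simp only [vacc, voff] at h0 ⊢
    rw [he.u64 168 (by decide)]
    exact h0
  | inr h1 => exact Or.inr (h1.transfer he hB)

/-- **FRAME of CB0**: the instance `p = f` of `transfer`. -/
theorem CB0.frame {Blk : Block → Prop} {mem mem' : Mem} {f : Nat} (h : CB0 Blk mem f) (hs : ObjSame f mem mem') :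
    CB0 Blk mem' f :=
  h.transfer (hs.sub (by decide)) (fun _ _ hb => hb)

/-- The block predicate changes, the memory does not: the instance `mem' = mem` of `transfer`. -/
theorem CB0.reblk {Blk Blk' : Block → Prop} {mem : Mem} {f : Nat} (h : CB0 Blk mem f)
    (hB : ∀ B, CB0.Owns mem f B → Blk B → Blk' B) : CB0 Blk' mem f :=
  h.transfer (ObjEq.refl _ mem f) hB

end Vorbis
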